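-- pv_equiv track=rewrite | github.com/valdimirbarros/algoritmos-estruturas-dados-ufma | lista2/questao7.py | agrupaParImpar
-- ===== SOURCE A (Python) =====
-- def agrupaParImpar(L):
--     pares = [x for x in L if x % 2 == 0]
--     impares = [x for x in L if x % 2 != 0]
--     P = []
--     pares.sort()
--     impares.sort()
--     P.extend(pares)
--     P.extend(impares)
--     return P
-- ===== SOURCE B (Python) =====
-- def agrupaParImpar(L):
--     return sorted(L, key=lambda x: (x % 2, x))
-- ===== Notes on version B (the rewrite author's own statement) =====
-- stated objective: simpler
-- what changed: B replaces A's partition-into-two-lists-then-two-sorts-then-concatenate with a single sort of the whole list under the composite key (x % 2, x): the lexicographic key puts all evens (key 0) before all odds (key 1), each class ordered by value, so no filtering or concatenation step exists at all.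
import Mathlib
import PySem

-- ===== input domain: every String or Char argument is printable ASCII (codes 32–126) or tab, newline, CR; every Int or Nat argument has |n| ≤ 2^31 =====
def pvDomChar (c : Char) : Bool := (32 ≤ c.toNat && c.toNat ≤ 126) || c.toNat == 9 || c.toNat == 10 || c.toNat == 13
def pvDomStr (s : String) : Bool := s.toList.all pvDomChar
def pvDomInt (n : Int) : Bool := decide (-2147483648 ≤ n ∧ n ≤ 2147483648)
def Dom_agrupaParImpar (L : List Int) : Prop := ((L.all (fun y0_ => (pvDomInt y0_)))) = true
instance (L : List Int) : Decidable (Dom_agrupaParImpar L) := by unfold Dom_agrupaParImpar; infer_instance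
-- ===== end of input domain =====

-- B replaces A's partition-then-two-sorts-then-concatenate with ONE sort of the whole list under the composite key (x % 2, x) (simpler, same cost).

-- ===== PORT A =====
def agrupaParImpar (L : List Int) : List Int :=
  let pares := L.filter (fun x => PySem.Int.mod x 2 == 0)
  let impares := L.filter (fun x => PySem.Int.mod x 2 != 0)
  let P : List Int := []
  let pares := PySem.List.sorted pares (fun x => x) false
  let impares := PySem.List.sorted impares (fun x => x) false
  let P := P ++ pares
  let P := P ++ impares
  P

-- ===== PORT B =====
def agrupaParImpar_alt (L : List Int) : List Int :=
  PySem.List.sorted2 L (fun x => PySem.Int.mod x 2) (fun x => x) false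

-- ===== PRECONDITION & SPEC =====
def Spec_agrupaParImpar (L : List Int) (out : List Int) : Prop := out = agrupaParImpar_alt L
instance (L : List Int) (out : List Int) : Decidable (Spec_agrupaParImpar L out) := by unfold Spec_agrupaParImpar; infer_instance

-- ===== CLAIM (what is proved, stated in full; the proofs are below) =====
def Claim_equal_agrupaParImpar : Prop := ∀ (L : List Int), Dom_agrupaParImpar L → Spec_agrupaParImpar L (agrupaParImpar L)

-- ===== LEMMAS AND PROOFS =====

-- the strict lexicographic "before" comparison sorted2 uses for key (x % 2, x)
def pvLt (a b : Int) : Bool :=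
  decide (PySem.Int.mod a 2 < PySem.Int.mod b 2) ||
    (!decide (PySem.Int.mod b 2 < PySem.Int.mod a 2) && decide (a < b))

-- arithmetic characterisation of pvLt
theorem pvLt_iff (a b : Int) :
    pvLt a b = true ↔ (a.fmod 2 < b.fmod 2 ∨ (¬ b.fmod 2 < a.fmod 2 ∧ a < b)) := by
  simp [pvLt, PySem.Int.mod]

theorem pvLt_asymm (a b : Int) (h : pvLt a b = true) : pvLt b a = false := by
  rw [pvLt_iff] at h
  rw [← Bool.not_eq_true, pvLt_iff]
  omega

theorem pvLt_antisymm (a b : Int) (h1 : pvLt a b = false) (h2 : pvLt b a = false) : a = b := by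
  rw [← Bool.not_eq_true, pvLt_iff] at h1 h2
  omega

theorem pvLt_trans_neg (x y z : Int) (h1 : pvLt x y = true) (h2 : pvLt z y = false) :
    pvLt z x = false := by
  rw [pvLt_iff] at h1
  rw [← Bool.not_eq_true, pvLt_iff] at h2 ⊢
  omega

-- "a may come before b in the output": the nondecreasing relation of pvLt
def pvR (a b : Int) : Prop := pvLt b a = false

-- insertBy with pvLt preserves pvR-sortedness
theorem insertBy_pvR (x : Int) (ys : List Int) (h : ys.Pairwise pvR) :
    (PySem.List.insertBy pvLt x ys).Pairwise pvR := by
  induction ys with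
  | nil => simp [PySem.List.insertBy]
  | cons y ys ih =>
    cases h with
    | cons hy hys =>
      by_cases hxy : pvLt x y = true
      · rw [PySem.List.insertBy, if_pos hxy]
        refine List.Pairwise.cons ?_ (List.Pairwise.cons hy hys)
        intro z hz
        rcases List.mem_cons.mp hz with rfl | hz
        · exact pvLt_asymm x z hxy
        · exact pvLt_trans_neg x y z hxy (hy z hz)
      · rw [PySem.List.insertBy, if_neg hxy]
        refine List.Pairwise.cons ?_ (ih hys)
        intro z hz
        rcases (PySem.List.mem_insertBy pvLt x z ys).mp hz with rfl | hz
        · exact Bool.eq_false_iff.mpr hxy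
        · exact hy z hz
      -- (insertBy equations used directly; insertBy pvLt x (y::ys) branches on pvLt x y)

-- the B port's output is pvR-sorted
theorem alt_pairwise (L : List Int) : (agrupaParImpar_alt L).Pairwise pvR := by
  show (List.foldl (fun acc x => PySem.List.insertBy pvLt x acc) [] L).Pairwise pvR
  generalize hacc : ([] : List Int) = acc
  have h : acc.Pairwise pvR := hacc ▸ List.Pairwise.nil
  clear hacc
  induction L generalizing acc with
  | nil => simpa using h
  | cons x L ih => exact ih _ (insertBy_pvR x acc h)

-- the A port's output is pvR-sorted: evens (fmod 2 = 0) precede odds (fmod 2 = 1),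
-- and within each parity class the list is value-sorted
theorem a_pairwise (L : List Int) : (agrupaParImpar L).Pairwise pvR := by
  show (PySem.List.sorted (L.filter (fun x => PySem.Int.mod x 2 == 0)) (fun x => x) false ++
        PySem.List.sorted (L.filter (fun x => PySem.Int.mod x 2 != 0)) (fun x => x) false).Pairwise pvR
  rw [List.pairwise_append]
  have hmem0 : ∀ a ∈ PySem.List.sorted (L.filter (fun x => PySem.Int.mod x 2 == 0)) (fun x => x) false,
      a.fmod 2 = 0 := by
    intro a ha
    rw [PySem.List.mem_sorted, List.mem_filter] at ha
    simpa [PySem.Int.mod] using ha.2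
  have hmem1 : ∀ a ∈ PySem.List.sorted (L.filter (fun x => PySem.Int.mod x 2 != 0)) (fun x => x) false,
      a.fmod 2 = 1 := by
    intro a ha
    rw [PySem.List.mem_sorted, List.mem_filter] at ha
    have h2 : a.fmod 2 = 0 ∨ a.fmod 2 = 1 := by
      rw [Int.fmod_eq_emod]; omega
    have := ha.2
    simp [PySem.Int.mod] at this
    omega
  refine ⟨?_, ?_, ?_⟩
  · refine (PySem.List.sorted_pairwise _ (fun x => x)).imp_of_mem ?_
    intro a b ha hb hle
    have ha0 := hmem0 a ha
    have hb0 := hmem0 b hb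
    show pvLt b a = false
    rw [← Bool.not_eq_true, pvLt_iff]
    omega
  · refine (PySem.List.sorted_pairwise _ (fun x => x)).imp_of_mem ?_
    intro a b ha hb hle
    have ha1 := hmem1 a ha
    have hb1 := hmem1 b hb
    show pvLt b a = false
    rw [← Bool.not_eq_true, pvLt_iff]
    omega
  · intro a ha b hb
    have ha0 := hmem0 a ha
    have hb1 := hmem1 b hb
    show pvLt b a = false
    rw [← Bool.not_eq_true, pvLt_iff]
    omega

-- the A port's output is a permutation of L
theorem a_perm (L : List Int) : (agrupaParImpar L).Perm L := by
  show (PySem.List.sorted (L.filter (fun x => PySem.Int.mod x 2 == 0)) (fun x => x) false ++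
        PySem.List.sorted (L.filter (fun x => PySem.Int.mod x 2 != 0)) (fun x => x) false).Perm L
  have h := List.Perm.append
    (PySem.List.sorted_perm (L.filter (fun x => PySem.Int.mod x 2 == 0)) (fun x => x) false)
    (PySem.List.sorted_perm (L.filter (fun x => PySem.Int.mod x 2 != 0)) (fun x => x) false)
  refine h.trans ?_
  have : (fun x : Int => PySem.Int.mod x 2 != 0) = fun x => !(PySem.Int.mod x 2 == 0) := by
    funext x; simp [bne]
  rw [this]
  exact L.filter_append_perm _

-- ===== VERDICT (by name: the statement is the Claim_ definition above) =====
theorem agrupaParImpar_spec : Claim_equal_agrupaParImpar := by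
  intro L _
  show agrupaParImpar L = agrupaParImpar_alt L
  refine List.Perm.eq_of_pairwise ?_ (a_pairwise L) (alt_pairwise L) ?_
  · intro a b _ _ h1 h2
    unfold pvR at h1 h2; exact pvLt_antisymm a b h2 h1
  · exact (a_perm L).trans (PySem.List.sorted2_perm L _ _ false).symm
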